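-- pv_equiv track=rewrite | github.com/noxwei/LibraryOfBabel | student_research_project_v2.py | _improve_transitions
-- ===== SOURCE A (Python) =====
-- def _improve_transitions(paper: str) -> str:
--     """Replace robotic transitions with natural ones"""
--     transition_replacements = {
--         'Furthermore,': 'Building on this,',
--         'Additionally,': 'What\'s more,',
--         'Moreover,': 'Even more interesting,',
--         'In conclusion,': 'Bringing this together,',
--         'To summarize,': 'Looking back over this,',
--         'It is important to note': 'Worth mentioning',
--         'It should be emphasized': 'What stands out'
--     }
--
--     for robotic, natural in transition_replacements.items():
--         paper = paper.replace(robotic, natural)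
--
--     return paper
-- ===== SOURCE B (Python) =====
-- def _improve_transitions(paper: str) -> str:
--     """Replace robotic transitions with natural ones (single left-to-right scan)"""
--     replacements = [
--         ('Furthermore,', 'Building on this,'),
--         ('Additionally,', 'What\'s more,'),
--         ('Moreover,', 'Even more interesting,'),
--         ('In conclusion,', 'Bringing this together,'),
--         ('To summarize,', 'Looking back over this,'),
--         ('It is important to note', 'Worth mentioning'),
--         ('It should be emphasized', 'What stands out'),
--     ]
--     out = []
--     i = 0
--     n = len(paper)
--     while i < n:
--         for robotic, natural in replacements:
--             if paper.startswith(robotic, i):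
--                 out.append(natural)
--                 i += len(robotic)
--                 break
--         else:
--             out.append(paper[i])
--             i += 1
--     return ''.join(out)
-- ===== Notes on version B (the rewrite author's own statement) =====
-- stated objective: alternative
-- what changed: A makes seven full passes over the string (one str.replace per phrase); B makes a single left-to-right scan that, at each position, emits the replacement of whichever phrase starts there (phrases never overlap and no replacement contains a phrase, so the results coincide).
import Mathlib
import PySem

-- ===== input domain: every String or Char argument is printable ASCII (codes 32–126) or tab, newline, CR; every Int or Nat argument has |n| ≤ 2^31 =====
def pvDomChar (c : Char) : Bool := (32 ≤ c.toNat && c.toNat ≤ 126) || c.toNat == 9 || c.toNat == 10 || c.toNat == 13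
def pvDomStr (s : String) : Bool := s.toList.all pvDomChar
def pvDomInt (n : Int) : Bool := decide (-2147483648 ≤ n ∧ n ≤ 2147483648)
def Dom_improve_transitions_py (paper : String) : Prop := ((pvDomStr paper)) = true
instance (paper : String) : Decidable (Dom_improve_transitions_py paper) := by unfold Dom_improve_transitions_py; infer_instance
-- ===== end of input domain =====

-- B replaces A's seven full-string `str.replace` passes by a single left-to-right scan
-- that at each position emits the replacement of whichever phrase starts there (objective: alternative).

-- ===== PORT A =====
def improve_transitions_py (paper : String) : String :=
  let paper := PySem.Str.replace paper "Furthermore," "Building on this,"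
  let paper := PySem.Str.replace paper "Additionally," "What's more,"
  let paper := PySem.Str.replace paper "Moreover," "Even more interesting,"
  let paper := PySem.Str.replace paper "In conclusion," "Bringing this together,"
  let paper := PySem.Str.replace paper "To summarize," "Looking back over this,"
  let paper := PySem.Str.replace paper "It is important to note" "Worth mentioning"
  let paper := PySem.Str.replace paper "It should be emphasized" "What stands out"
  paper

-- ===== PORT B =====
-- the ordered (robotic, natural) pairs of Source B
def pvK1 : List Char := "Furthermore,".toList
def pvR1 : List Char := "Building on this,".toList
def pvK2 : List Char := "Additionally,".toList
def pvR2 : List Char := "What's more,".toList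
def pvK3 : List Char := "Moreover,".toList
def pvR3 : List Char := "Even more interesting,".toList
def pvK4 : List Char := "In conclusion,".toList
def pvR4 : List Char := "Bringing this together,".toList
def pvK5 : List Char := "To summarize,".toList
def pvR5 : List Char := "Looking back over this,".toList
def pvK6 : List Char := "It is important to note".toList
def pvR6 : List Char := "Worth mentioning".toList
def pvK7 : List Char := "It should be emphasized".toList
def pvR7 : List Char := "What stands out".toList

-- Source B's single scan: at each position, the first pair whose key starts here is taken
def scanChars : List Char → List Char
  | [] => []
  | c :: t =>
    if pvK1 <+: c :: t then pvR1 ++ scanChars ((c :: t).drop pvK1.length)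
    else if pvK2 <+: c :: t then pvR2 ++ scanChars ((c :: t).drop pvK2.length)
    else if pvK3 <+: c :: t then pvR3 ++ scanChars ((c :: t).drop pvK3.length)
    else if pvK4 <+: c :: t then pvR4 ++ scanChars ((c :: t).drop pvK4.length)
    else if pvK5 <+: c :: t then pvR5 ++ scanChars ((c :: t).drop pvK5.length)
    else if pvK6 <+: c :: t then pvR6 ++ scanChars ((c :: t).drop pvK6.length)
    else if pvK7 <+: c :: t then pvR7 ++ scanChars ((c :: t).drop pvK7.length)
    else c :: scanChars t
termination_by l => l.length
decreasing_by all_goals simp [pvK1, pvK2, pvK3, pvK4, pvK5, pvK6, pvK7]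

def improve_transitions_py_alt (paper : String) : String :=
  String.ofList (scanChars paper.toList)

-- ===== PRECONDITION & SPEC =====
def Spec_improve_transitions_py (paper : String) (out : String) : Prop := out = improve_transitions_py_alt paper
instance (paper : String) (out : String) : Decidable (Spec_improve_transitions_py paper out) := by unfold Spec_improve_transitions_py; infer_instance

-- ===== CLAIM (what is proved, stated in full; the proofs are below) =====
def Claim_equal_improve_transitions_py : Prop := ∀ (paper : String), Dom_improve_transitions_py paper → Spec_improve_transitions_py paper (improve_transitions_py paper)

-- ===== LEMMAS AND PROOFS =====

-- uppercase-ASCII bookkeeping: every key starts with an uppercase letter and contains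
-- no other uppercase letter; the same holds for every replacement.
def pvUp (c : Char) : Bool := 'A' ≤ c && c ≤ 'Z'
def pvNoUp (l : List Char) : Bool := l.all (fun c => !pvUp c)
def pvHeadUp : List Char → Bool
  | [] => false
  | c :: _ => pvUp c

lemma pvHeadUp_ne_nil {k : List Char} (h : pvHeadUp k = true) : k ≠ [] := by
  cases k with
  | nil => simp [pvHeadUp] at h
  | cons a l => simp

-- one-step unfoldings of PySem.Chars.replace.go
lemma go_zero (k r l acc : List Char) : PySem.Chars.replace.go k r 0 l acc = acc.reverse ++ l := by
  rw [PySem.Chars.replace.go]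

lemma go_succ_nil (k r acc : List Char) (fuel : Nat) :
    PySem.Chars.replace.go k r (fuel + 1) [] acc = acc.reverse := by
  rw [PySem.Chars.replace.go]
  simp

lemma go_succ_cons (k r : List Char) (c : Char) (t acc : List Char) (fuel : Nat) :
    PySem.Chars.replace.go k r (fuel + 1) (c :: t) acc =
      if k.isPrefixOf (c :: t) then PySem.Chars.replace.go k r fuel ((c :: t).drop k.length) (r.reverse ++ acc)
      else PySem.Chars.replace.go k r fuel t (c :: acc) := by
  rw [PySem.Chars.replace.go]

-- with enough fuel, go is its own normal form with the accumulator in front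
lemma go_spec (k r : List Char) (hk : k ≠ []) :
    ∀ (fuel : Nat) (l acc : List Char), l.length ≤ fuel →
      PySem.Chars.replace.go k r fuel l acc = acc.reverse ++ PySem.Chars.replace.go k r l.length l [] := by
  intro fuel
  induction fuel using Nat.strong_induction_on with
  | _ fuel ih =>
    intro l acc hl
    cases fuel with
    | zero =>
      have hnil : l = [] := by
        cases l with
        | nil => rfl
        | cons a t => simp at hl
      subst hnil
      simp [go_zero]
    | succ m =>
      cases l with
      | nil => simp [go_succ_nil, go_zero]
      | cons c t =>
        have hlc : (c :: t).length = t.length + 1 := by simp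
        rw [go_succ_cons, hlc, go_succ_cons]
        by_cases hp : k.isPrefixOf (c :: t)
        · rw [if_pos hp, if_pos hp]
          have hk1 : 1 ≤ k.length := by
            cases k with
            | nil => exact absurd rfl hk
            | cons a l => simp
          have hdl : ((c :: t).drop k.length).length ≤ t.length := by
            simp only [List.length_drop]
            simp only [List.length_cons]
            omega
          have hmt : t.length ≤ m := by simpa [hlc] using hl
          rw [ih m (Nat.lt_succ_self m) _ _ (le_trans hdl hmt),
              ih t.length (Nat.lt_succ_of_le hmt) _ _ hdl]
          simp
        · rw [if_neg hp, if_neg hp]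
          have hmt : t.length ≤ m := by simpa [hlc] using hl
          rw [ih m (Nat.lt_succ_self m) t (c :: acc) hmt,
              ih t.length (Nat.lt_succ_of_le hmt) t [c] le_rfl]
          simp

lemma replace_def (s k r : List Char) (hk : k ≠ []) :
    PySem.Chars.replace s k r = PySem.Chars.replace.go k r s.length s [] := by
  simp only [PySem.Chars.replace]
  rw [if_neg]
  simp [List.isEmpty_iff, hk]

lemma rep_nil (k r : List Char) (hk : k ≠ []) : PySem.Chars.replace [] k r = [] := by
  rw [replace_def _ _ _ hk]
  simp [go_zero]

lemma rep_cons (k r : List Char) (c : Char) (t : List Char) (hk : k ≠ [])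
    (h : ¬ k <+: c :: t) :
    PySem.Chars.replace (c :: t) k r = c :: PySem.Chars.replace t k r := by
  rw [replace_def _ _ _ hk, replace_def _ _ _ hk]
  have : (c :: t).length = t.length + 1 := by simp
  rw [this, go_succ_cons, if_neg (by simpa [List.isPrefixOf_iff_prefix] using h)]
  rw [go_spec k r hk t.length t [c] le_rfl]
  simp

lemma rep_self (k r t : List Char) (hk : k ≠ []) :
    PySem.Chars.replace (k ++ t) k r = r ++ PySem.Chars.replace t k r := by
  cases k with
  | nil => exact absurd rfl hk
  | cons kc ktl =>
    rw [replace_def _ _ _ hk, replace_def _ _ _ hk]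
    simp only [List.cons_append]
    rw [show (kc :: (ktl ++ t)).length = (ktl ++ t).length + 1 from rfl, go_succ_cons]
    rw [if_pos (by rw [List.isPrefixOf_iff_prefix, show kc :: (ktl ++ t) = (kc :: ktl) ++ t from rfl]; exact List.prefix_append _ _)]
    have hdrop : (kc :: (ktl ++ t)).drop (kc :: ktl).length = t := by
      have h0 : List.drop (kc :: ktl).length ((kc :: ktl) ++ t) = t := List.drop_left
      simp only [List.cons_append] at h0
      exact h0
    rw [hdrop]
    have hle : t.length ≤ (ktl ++ t).length := by simp
    rw [go_spec _ _ hk _ _ _ hle]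
    simp

-- a match of k cannot start inside a block of non-uppercase characters
lemma pass_noUp (k r : List Char) (hk : pvHeadUp k = true) :
    ∀ u t : List Char, pvNoUp u = true →
      PySem.Chars.replace (u ++ t) k r = u ++ PySem.Chars.replace t k r := by
  intro u
  induction u with
  | nil => intro t _; simp
  | cons uc utl ih =>
    intro t hu
    have hu' : pvUp uc = false ∧ utl.all (fun c => !pvUp c) = true := by
      simpa [pvNoUp, Bool.not_eq_true'] using hu
    have hu1 : pvUp uc = false := hu'.1
    have hu2 : pvNoUp utl = true := hu'.2
    have hnp : ¬ k <+: (uc :: utl) ++ t := by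
      cases k with
      | nil => simp [pvHeadUp] at hk
      | cons kc ktl =>
        intro hpre
        rw [show (uc :: utl) ++ t = uc :: (utl ++ t) from rfl, List.cons_prefix_cons] at hpre
        have : pvUp uc = true := by rw [← hpre.1]; simpa [pvHeadUp] using hk
        rw [this] at hu1; exact absurd hu1 (by simp)
    rw [show (uc :: utl) ++ t = uc :: (utl ++ t) from rfl,
        rep_cons _ _ _ _ (pvHeadUp_ne_nil hk) (by simpa using hnp), ih t hu2]
    rfl

-- a whole key/replacement block passes unchanged through replace with a different key
lemma pass_key (u k r t : List Char) (h1 : ¬ k <+: u) (h2 : ¬ u <+: k)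
    (hu : pvNoUp u.tail = true) (hk : pvHeadUp k = true) :
    PySem.Chars.replace (u ++ t) k r = u ++ PySem.Chars.replace t k r := by
  cases u with
  | nil => exact absurd (List.nil_prefix) h2
  | cons uc utl =>
    have hnp : ¬ k <+: (uc :: utl) ++ t := by
      intro hpre
      rcases List.prefix_or_prefix_of_prefix hpre (List.prefix_append (uc :: utl) t) with h | h
      · exact h1 h
      · exact h2 h
    rw [show (uc :: utl) ++ t = uc :: (utl ++ t) from rfl,
        rep_cons _ _ _ _ (pvHeadUp_ne_nil hk) (by simpa using hnp),
        pass_noUp k r hk utl t (by simpa using hu)]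
    rfl

-- a prefix without uppercase letters of replace's output was already a prefix of its input
lemma prefix_reflect (k r : List Char) (hk : pvHeadUp k = true) (hr : pvHeadUp r = true) :
    ∀ x rest : List Char, pvNoUp rest = true →
      rest <+: PySem.Chars.replace x k r → rest <+: x := by
  intro x
  induction x with
  | nil =>
    intro rest _ hpre
    rwa [rep_nil _ _ (pvHeadUp_ne_nil hk)] at hpre
  | cons c t ih =>
    intro rest hrest hpre
    by_cases hp : k <+: c :: t
    · rcases hp with ⟨t', ht'⟩
      rw [← ht', rep_self _ _ _ (pvHeadUp_ne_nil hk)] at hpre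
      cases rest with
      | nil => exact List.nil_prefix
      | cons rc rest' =>
        exfalso
        cases r with
        | nil => simp [pvHeadUp] at hr
        | cons rc0 rtl =>
          simp only [List.cons_append, List.cons_prefix_cons] at hpre
          have h1 : pvUp rc = true := by rw [hpre.1]; simpa [pvHeadUp] using hr
          have h2 : pvUp rc = false := by
            have := hrest
            simp only [pvNoUp, List.all_cons, Bool.and_eq_true, Bool.not_eq_true'] at this
            exact this.1
          rw [h1] at h2; exact absurd h2 (by simp)
    · rw [rep_cons _ _ _ _ (pvHeadUp_ne_nil hk) hp] at hpre
      cases rest with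
      | nil => exact List.nil_prefix
      | cons rc rest' =>
        rw [List.cons_prefix_cons] at hpre ⊢
        refine ⟨hpre.1, ih rest' ?_ hpre.2⟩
        simp only [pvNoUp, List.all_cons, Bool.and_eq_true, Bool.not_eq_true'] at hrest
        exact hrest.2

-- 'no key starts here' survives a replace pass on the tail
lemma cons_nomatch (k k' r' : List Char) (c : Char) (t : List Char)
    (hkt : pvNoUp k.tail = true) (hk' : pvHeadUp k' = true) (hr' : pvHeadUp r' = true)
    (h : ¬ k <+: c :: t) : ¬ k <+: c :: PySem.Chars.replace t k' r' := by
  intro hp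
  cases k with
  | nil => exact h List.nil_prefix
  | cons kc ktl =>
    rw [List.cons_prefix_cons] at hp
    have : ktl <+: t := prefix_reflect k' r' hk' hr' t ktl (by simpa using hkt) hp.2
    exact h (by rw [List.cons_prefix_cons]; exact ⟨hp.1, this⟩)

lemma scan_nil : scanChars [] = [] := by
  rw [scanChars]

lemma scan_cons (c : Char) (t : List Char) :
    scanChars (c :: t) =
      (if pvK1 <+: c :: t then pvR1 ++ scanChars ((c :: t).drop pvK1.length)
    else if pvK2 <+: c :: t then pvR2 ++ scanChars ((c :: t).drop pvK2.length)
    else if pvK3 <+: c :: t then pvR3 ++ scanChars ((c :: t).drop pvK3.length)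
    else if pvK4 <+: c :: t then pvR4 ++ scanChars ((c :: t).drop pvK4.length)
    else if pvK5 <+: c :: t then pvR5 ++ scanChars ((c :: t).drop pvK5.length)
    else if pvK6 <+: c :: t then pvR6 ++ scanChars ((c :: t).drop pvK6.length)
    else if pvK7 <+: c :: t then pvR7 ++ scanChars ((c :: t).drop pvK7.length)
    else c :: scanChars t) := by
  rw [scanChars]

lemma comp_nil :
    PySem.Chars.replace (PySem.Chars.replace (PySem.Chars.replace (PySem.Chars.replace (PySem.Chars.replace (PySem.Chars.replace (PySem.Chars.replace (([] : List Char)) pvK1 pvR1) pvK2 pvR2) pvK3 pvR3) pvK4 pvR4) pvK5 pvR5) pvK6 pvR6) pvK7 pvR7 = scanChars [] := by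
  rw [rep_nil _ _ (by decide : pvK1 ≠ [])]
  rw [rep_nil _ _ (by decide : pvK2 ≠ [])]
  rw [rep_nil _ _ (by decide : pvK3 ≠ [])]
  rw [rep_nil _ _ (by decide : pvK4 ≠ [])]
  rw [rep_nil _ _ (by decide : pvK5 ≠ [])]
  rw [rep_nil _ _ (by decide : pvK6 ≠ [])]
  rw [rep_nil _ _ (by decide : pvK7 ≠ [])]
  rw [scan_nil]

-- the seven sequential passes of A equal B's single scan
lemma main_chars : ∀ n : Nat, ∀ s : List Char, s.length ≤ n →
    PySem.Chars.replace (PySem.Chars.replace (PySem.Chars.replace (PySem.Chars.replace (PySem.Chars.replace (PySem.Chars.replace (PySem.Chars.replace (s) pvK1 pvR1) pvK2 pvR2) pvK3 pvR3) pvK4 pvR4) pvK5 pvR5) pvK6 pvR6) pvK7 pvR7 = scanChars s := by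
  intro n
  induction n with
  | zero =>
    intro s hs
    have hnil : s = [] := by
      cases s with
      | nil => rfl
      | cons a l => simp at hs
    subst hnil
    exact comp_nil
  | succ n ih =>
    intro s hs
    cases s with
    | nil => exact comp_nil
    | cons c t =>
      by_cases h1 : pvK1 <+: c :: t
      · have hj' := h1
        obtain ⟨t', ht⟩ := hj'
        rw [scan_cons, if_pos h1, ← ht, List.drop_left]
        rw [rep_self pvK1 pvR1 _ (by decide)]
        rw [pass_key pvR1 pvK2 pvR2 _ (by decide) (by decide) (by decide) (by decide)]
        rw [pass_key pvR1 pvK3 pvR3 _ (by decide) (by decide) (by decide) (by decide)]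
        rw [pass_key pvR1 pvK4 pvR4 _ (by decide) (by decide) (by decide) (by decide)]
        rw [pass_key pvR1 pvK5 pvR5 _ (by decide) (by decide) (by decide) (by decide)]
        rw [pass_key pvR1 pvK6 pvR6 _ (by decide) (by decide) (by decide) (by decide)]
        rw [pass_key pvR1 pvK7 pvR7 _ (by decide) (by decide) (by decide) (by decide)]
        have hlk : pvK1.length = 12 := by decide
        have h' := congrArg List.length ht
        simp only [List.length_append, List.length_cons, hlk] at h'
        simp only [List.length_cons] at hs
        rw [ih t' (by omega)]
      by_cases h2 : pvK2 <+: c :: t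
      · have hj' := h2
        obtain ⟨t', ht⟩ := hj'
        rw [scan_cons, if_neg h1, if_pos h2, ← ht, List.drop_left]
        rw [pass_key pvK2 pvK1 pvR1 _ (by decide) (by decide) (by decide) (by decide)]
        rw [rep_self pvK2 pvR2 _ (by decide)]
        rw [pass_key pvR2 pvK3 pvR3 _ (by decide) (by decide) (by decide) (by decide)]
        rw [pass_key pvR2 pvK4 pvR4 _ (by decide) (by decide) (by decide) (by decide)]
        rw [pass_key pvR2 pvK5 pvR5 _ (by decide) (by decide) (by decide) (by decide)]
        rw [pass_key pvR2 pvK6 pvR6 _ (by decide) (by decide) (by decide) (by decide)]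
        rw [pass_key pvR2 pvK7 pvR7 _ (by decide) (by decide) (by decide) (by decide)]
        have hlk : pvK2.length = 13 := by decide
        have h' := congrArg List.length ht
        simp only [List.length_append, List.length_cons, hlk] at h'
        simp only [List.length_cons] at hs
        rw [ih t' (by omega)]
      by_cases h3 : pvK3 <+: c :: t
      · have hj' := h3
        obtain ⟨t', ht⟩ := hj'
        rw [scan_cons, if_neg h1, if_neg h2, if_pos h3, ← ht, List.drop_left]
        rw [pass_key pvK3 pvK1 pvR1 _ (by decide) (by decide) (by decide) (by decide)]
        rw [pass_key pvK3 pvK2 pvR2 _ (by decide) (by decide) (by decide) (by decide)]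
        rw [rep_self pvK3 pvR3 _ (by decide)]
        rw [pass_key pvR3 pvK4 pvR4 _ (by decide) (by decide) (by decide) (by decide)]
        rw [pass_key pvR3 pvK5 pvR5 _ (by decide) (by decide) (by decide) (by decide)]
        rw [pass_key pvR3 pvK6 pvR6 _ (by decide) (by decide) (by decide) (by decide)]
        rw [pass_key pvR3 pvK7 pvR7 _ (by decide) (by decide) (by decide) (by decide)]
        have hlk : pvK3.length = 9 := by decide
        have h' := congrArg List.length ht
        simp only [List.length_append, List.length_cons, hlk] at h'
        simp only [List.length_cons] at hs
        rw [ih t' (by omega)]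
      by_cases h4 : pvK4 <+: c :: t
      · have hj' := h4
        obtain ⟨t', ht⟩ := hj'
        rw [scan_cons, if_neg h1, if_neg h2, if_neg h3, if_pos h4, ← ht, List.drop_left]
        rw [pass_key pvK4 pvK1 pvR1 _ (by decide) (by decide) (by decide) (by decide)]
        rw [pass_key pvK4 pvK2 pvR2 _ (by decide) (by decide) (by decide) (by decide)]
        rw [pass_key pvK4 pvK3 pvR3 _ (by decide) (by decide) (by decide) (by decide)]
        rw [rep_self pvK4 pvR4 _ (by decide)]
        rw [pass_key pvR4 pvK5 pvR5 _ (by decide) (by decide) (by decide) (by decide)]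
        rw [pass_key pvR4 pvK6 pvR6 _ (by decide) (by decide) (by decide) (by decide)]
        rw [pass_key pvR4 pvK7 pvR7 _ (by decide) (by decide) (by decide) (by decide)]
        have hlk : pvK4.length = 14 := by decide
        have h' := congrArg List.length ht
        simp only [List.length_append, List.length_cons, hlk] at h'
        simp only [List.length_cons] at hs
        rw [ih t' (by omega)]
      by_cases h5 : pvK5 <+: c :: t
      · have hj' := h5
        obtain ⟨t', ht⟩ := hj'
        rw [scan_cons, if_neg h1, if_neg h2, if_neg h3, if_neg h4, if_pos h5, ← ht, List.drop_left]
        rw [pass_key pvK5 pvK1 pvR1 _ (by decide) (by decide) (by decide) (by decide)]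
        rw [pass_key pvK5 pvK2 pvR2 _ (by decide) (by decide) (by decide) (by decide)]
        rw [pass_key pvK5 pvK3 pvR3 _ (by decide) (by decide) (by decide) (by decide)]
        rw [pass_key pvK5 pvK4 pvR4 _ (by decide) (by decide) (by decide) (by decide)]
        rw [rep_self pvK5 pvR5 _ (by decide)]
        rw [pass_key pvR5 pvK6 pvR6 _ (by decide) (by decide) (by decide) (by decide)]
        rw [pass_key pvR5 pvK7 pvR7 _ (by decide) (by decide) (by decide) (by decide)]
        have hlk : pvK5.length = 13 := by decide
        have h' := congrArg List.length ht
        simp only [List.length_append, List.length_cons, hlk] at h'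
        simp only [List.length_cons] at hs
        rw [ih t' (by omega)]
      by_cases h6 : pvK6 <+: c :: t
      · have hj' := h6
        obtain ⟨t', ht⟩ := hj'
        rw [scan_cons, if_neg h1, if_neg h2, if_neg h3, if_neg h4, if_neg h5, if_pos h6, ← ht, List.drop_left]
        rw [pass_key pvK6 pvK1 pvR1 _ (by decide) (by decide) (by decide) (by decide)]
        rw [pass_key pvK6 pvK2 pvR2 _ (by decide) (by decide) (by decide) (by decide)]
        rw [pass_key pvK6 pvK3 pvR3 _ (by decide) (by decide) (by decide) (by decide)]
        rw [pass_key pvK6 pvK4 pvR4 _ (by decide) (by decide) (by decide) (by decide)]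
        rw [pass_key pvK6 pvK5 pvR5 _ (by decide) (by decide) (by decide) (by decide)]
        rw [rep_self pvK6 pvR6 _ (by decide)]
        rw [pass_key pvR6 pvK7 pvR7 _ (by decide) (by decide) (by decide) (by decide)]
        have hlk : pvK6.length = 23 := by decide
        have h' := congrArg List.length ht
        simp only [List.length_append, List.length_cons, hlk] at h'
        simp only [List.length_cons] at hs
        rw [ih t' (by omega)]
      by_cases h7 : pvK7 <+: c :: t
      · have hj' := h7
        obtain ⟨t', ht⟩ := hj'
        rw [scan_cons, if_neg h1, if_neg h2, if_neg h3, if_neg h4, if_neg h5, if_neg h6, if_pos h7, ← ht, List.drop_left]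
        rw [pass_key pvK7 pvK1 pvR1 _ (by decide) (by decide) (by decide) (by decide)]
        rw [pass_key pvK7 pvK2 pvR2 _ (by decide) (by decide) (by decide) (by decide)]
        rw [pass_key pvK7 pvK3 pvR3 _ (by decide) (by decide) (by decide) (by decide)]
        rw [pass_key pvK7 pvK4 pvR4 _ (by decide) (by decide) (by decide) (by decide)]
        rw [pass_key pvK7 pvK5 pvR5 _ (by decide) (by decide) (by decide) (by decide)]
        rw [pass_key pvK7 pvK6 pvR6 _ (by decide) (by decide) (by decide) (by decide)]
        rw [rep_self pvK7 pvR7 _ (by decide)]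
        have hlk : pvK7.length = 23 := by decide
        have h' := congrArg List.length ht
        simp only [List.length_append, List.length_cons, hlk] at h'
        simp only [List.length_cons] at hs
        rw [ih t' (by omega)]
      rw [scan_cons, if_neg h1, if_neg h2, if_neg h3, if_neg h4, if_neg h5, if_neg h6, if_neg h7]
      rw [rep_cons pvK1 pvR1 c t (by decide) h1]
      have h2b1 := cons_nomatch pvK2 pvK1 pvR1 c _ (by decide) (by decide) (by decide) h2
      rw [rep_cons pvK2 pvR2 c _ (by decide) h2b1]
      have h3b1 := cons_nomatch pvK3 pvK1 pvR1 c _ (by decide) (by decide) (by decide) h3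
      have h3b2 := cons_nomatch pvK3 pvK2 pvR2 c _ (by decide) (by decide) (by decide) h3b1
      rw [rep_cons pvK3 pvR3 c _ (by decide) h3b2]
      have h4b1 := cons_nomatch pvK4 pvK1 pvR1 c _ (by decide) (by decide) (by decide) h4
      have h4b2 := cons_nomatch pvK4 pvK2 pvR2 c _ (by decide) (by decide) (by decide) h4b1
      have h4b3 := cons_nomatch pvK4 pvK3 pvR3 c _ (by decide) (by decide) (by decide) h4b2
      rw [rep_cons pvK4 pvR4 c _ (by decide) h4b3]
      have h5b1 := cons_nomatch pvK5 pvK1 pvR1 c _ (by decide) (by decide) (by decide) h5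
      have h5b2 := cons_nomatch pvK5 pvK2 pvR2 c _ (by decide) (by decide) (by decide) h5b1
      have h5b3 := cons_nomatch pvK5 pvK3 pvR3 c _ (by decide) (by decide) (by decide) h5b2
      have h5b4 := cons_nomatch pvK5 pvK4 pvR4 c _ (by decide) (by decide) (by decide) h5b3
      rw [rep_cons pvK5 pvR5 c _ (by decide) h5b4]
      have h6b1 := cons_nomatch pvK6 pvK1 pvR1 c _ (by decide) (by decide) (by decide) h6
      have h6b2 := cons_nomatch pvK6 pvK2 pvR2 c _ (by decide) (by decide) (by decide) h6b1
      have h6b3 := cons_nomatch pvK6 pvK3 pvR3 c _ (by decide) (by decide) (by decide) h6b2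
      have h6b4 := cons_nomatch pvK6 pvK4 pvR4 c _ (by decide) (by decide) (by decide) h6b3
      have h6b5 := cons_nomatch pvK6 pvK5 pvR5 c _ (by decide) (by decide) (by decide) h6b4
      rw [rep_cons pvK6 pvR6 c _ (by decide) h6b5]
      have h7b1 := cons_nomatch pvK7 pvK1 pvR1 c _ (by decide) (by decide) (by decide) h7
      have h7b2 := cons_nomatch pvK7 pvK2 pvR2 c _ (by decide) (by decide) (by decide) h7b1
      have h7b3 := cons_nomatch pvK7 pvK3 pvR3 c _ (by decide) (by decide) (by decide) h7b2
      have h7b4 := cons_nomatch pvK7 pvK4 pvR4 c _ (by decide) (by decide) (by decide) h7b3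
      have h7b5 := cons_nomatch pvK7 pvK5 pvR5 c _ (by decide) (by decide) (by decide) h7b4
      have h7b6 := cons_nomatch pvK7 pvK6 pvR6 c _ (by decide) (by decide) (by decide) h7b5
      rw [rep_cons pvK7 pvR7 c _ (by decide) h7b6]
      simp only [List.length_cons] at hs
      rw [ih t (by omega)]

theorem improve_transitions_py_spec : Claim_equal_improve_transitions_py := by
  intro paper _
  unfold Spec_improve_transitions_py
  apply String.toList_inj.mp
  simp only [improve_transitions_py, improve_transitions_py_alt, PySem.Str.toList_replace,
    String.toList_ofList]
  exact main_chars paper.toList.length paper.toList le_rfl
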